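-- pv_equiv track=rewrite | github.com/teodorivanov98/Log-Collector | modules/keyword_filter.py | apply_keyword_filter
-- ===== SOURCE A (Python) =====
-- def apply_keyword_filter(logs_dict, keyword_string):
--     if not keyword_string:
--         return logs_dict
--
--     keywords = [kw.strip().lower() for kw in keyword_string.split(",")]
--     filtered_logs = {}
--
--     for key, content in logs_dict.items():
--         lines = content.splitlines()
--         filtered = [line for line in lines if any(kw in line.lower() for kw in keywords)]
--         filtered_logs[key] = "\n".join(filtered) if filtered else "No matching lines found."
--
--     return filtered_logs
-- ===== SOURCE B (Python) =====
-- def _filter_content(content, keywords):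
--     lines = content.splitlines()
--     lows = [line.lower() for line in lines]
--     mask = [False] * len(lines)
--     for kw in keywords:
--         for i, low in enumerate(lows):
--             if kw in low:
--                 mask[i] = True
--     kept = [line for line, m in zip(lines, mask) if m]
--     return "\n".join(kept) if kept else "No matching lines found."
--
--
-- def apply_keyword_filter(logs_dict, keyword_string):
--     if not keyword_string:
--         return logs_dict
--     keywords = [kw.strip().lower() for kw in keyword_string.split(",")]
--     return {key: _filter_content(content, keywords) for key, content in logs_dict.items()}
-- ===== Notes on version B (the rewrite author's own statement) =====
-- stated objective: alternative
-- what changed: B inverts the loop nesting: per file it lowercases each line once, then marks matching lines keyword-by-keyword into a boolean mask (instead of a per-line any() scan over all keywords), and builds the result dict with a comprehension over a helper.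
import Mathlib
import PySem

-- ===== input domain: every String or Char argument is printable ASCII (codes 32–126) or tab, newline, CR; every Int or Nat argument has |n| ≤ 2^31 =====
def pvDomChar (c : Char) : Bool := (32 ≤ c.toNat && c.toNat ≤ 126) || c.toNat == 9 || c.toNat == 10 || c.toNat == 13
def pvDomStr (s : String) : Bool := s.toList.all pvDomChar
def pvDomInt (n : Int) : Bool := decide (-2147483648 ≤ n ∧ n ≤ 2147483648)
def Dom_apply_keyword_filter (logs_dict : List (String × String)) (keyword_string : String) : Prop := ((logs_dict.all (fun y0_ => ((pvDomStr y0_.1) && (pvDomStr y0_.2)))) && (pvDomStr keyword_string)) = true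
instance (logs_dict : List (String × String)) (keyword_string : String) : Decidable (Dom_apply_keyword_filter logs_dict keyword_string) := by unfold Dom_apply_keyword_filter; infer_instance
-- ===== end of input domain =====

-- B inverts the loop nesting (keyword-outer boolean mask over once-lowered lines) instead of A's per-line any() over keywords; alternative decomposition, same cost.
-- ===== PORT A =====
-- per-item body of A's loop: lines, filtered, and the stored string
def filteredValue (keywords : List String) (content : String) : String :=
  let lines := PySem.Str.splitlines content
  let filtered := lines.filter (fun line => keywords.any (fun kw => PySem.Str.isIn kw (PySem.Str.lower line)))
  if filtered = [] then "No matching lines found." else PySem.Str.join "\n" filtered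

def apply_keyword_filter (logs_dict : List (String × String)) (keyword_string : String) : List (String × String) :=
  if keyword_string = "" then logs_dict
  else
    let keywords := ((PySem.Str.split? keyword_string ",").getD []).map (fun kw => PySem.Str.lower (PySem.Str.strip kw))
    (logs_dict.foldl (fun (d : PySem.Dict String String) p => d.insert p.1 (filteredValue keywords p.2))
      PySem.Dict.empty).items

-- ===== PORT B =====
def filterContent (content : String) (keywords : List String) : String :=
  let lines := PySem.Str.splitlines content
  let lows := lines.map PySem.Str.lower
  let mask := keywords.foldl
    (fun mask kw => List.zipWith (fun m low => m || PySem.Str.isIn kw low) mask lows)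
    (List.replicate lines.length false)
  let kept := ((lines.zip mask).filter (fun p => p.2)).map (fun p => p.1)
  if kept = [] then "No matching lines found." else PySem.Str.join "\n" kept

def apply_keyword_filter_alt (logs_dict : List (String × String)) (keyword_string : String) : List (String × String) :=
  if keyword_string = "" then logs_dict
  else
    let keywords := ((PySem.Str.split? keyword_string ",").getD []).map (fun kw => PySem.Str.lower (PySem.Str.strip kw))
    logs_dict.map (fun p => (p.1, filterContent p.2 keywords))

-- ===== PRECONDITION & SPEC =====
-- Pre_: the logs_dict argument models a Python dict, which cannot hold duplicate keys, so its keys are distinct.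
def Pre_apply_keyword_filter (logs_dict : List (String × String)) (keyword_string : String) : Prop :=
  (logs_dict.map Prod.fst).Nodup
instance (logs_dict : List (String × String)) (keyword_string : String) : Decidable (Pre_apply_keyword_filter logs_dict keyword_string) := by unfold Pre_apply_keyword_filter; infer_instance
def pvWitness_apply_keyword_filter : (List (String × String)) × String :=
  ([("app.log", "Error: bad\nall fine"), ("sys.log", "ok")], "error, fail")

def Spec_apply_keyword_filter (logs_dict : List (String × String)) (keyword_string : String) (out : List (String × String)) : Prop := out = apply_keyword_filter_alt logs_dict keyword_string
instance (logs_dict : List (String × String)) (keyword_string : String) (out : List (String × String)) : Decidable (Spec_apply_keyword_filter logs_dict keyword_string out) := by unfold Spec_apply_keyword_filter; infer_instance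

-- ===== CLAIM (what is proved, stated in full; the proofs are below) =====
def Claim_equal_apply_keyword_filter : Prop := ∀ (logs_dict : List (String × String)) (keyword_string : String), Dom_apply_keyword_filter logs_dict keyword_string → Pre_apply_keyword_filter logs_dict keyword_string → Spec_apply_keyword_filter logs_dict keyword_string (apply_keyword_filter logs_dict keyword_string)

-- ===== LEMMAS AND PROOFS =====

theorem zipWith_fst_self {α β : Type} (m : List α) (lows : List β) (h : m.length = lows.length) :
    List.zipWith (fun a _ => a) m lows = m := by
  induction m generalizing lows with
  | nil => simp
  | cons a t ih =>
    cases lows with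
    | nil => simp at h
    | cons b lt => simp_all

theorem zipWith_zipWith_same {α β γ δ : Type} (f : α → β → γ) (g : γ → β → δ)
    (m : List α) (lows : List β) :
    List.zipWith g (List.zipWith f m lows) lows = List.zipWith (fun a b => g (f a b) b) m lows := by
  induction m generalizing lows with
  | nil => simp
  | cons a t ih =>
    cases lows with
    | nil => simp
    | cons b lt => simp_all

theorem mask_foldl (ks : List String) (m : List Bool) (lows : List String)
    (h : m.length = lows.length) :
    ks.foldl (fun mask kw => List.zipWith (fun mi low => mi || PySem.Str.isIn kw low) mask lows) m
      = List.zipWith (fun mi low => mi || ks.any (fun kw => PySem.Str.isIn kw low)) m lows := by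
  induction ks generalizing m with
  | nil =>
    simp only [List.foldl_nil, List.any_nil, Bool.or_false]
    exact (zipWith_fst_self m lows h).symm
  | cons kw kt ih =>
    simp only [List.foldl_cons]
    rw [ih _ (by simp [h]), zipWith_zipWith_same]
    simp [Bool.or_assoc]

theorem zipWith_or_replicate_false (n : Nat) (lows : List String) (p : String → Bool)
    (h : n = lows.length) :
    List.zipWith (fun mi low => mi || p low) (List.replicate n false) lows
      = lows.map p := by
  subst h
  induction lows with
  | nil => simp
  | cons a t ih => simp [List.replicate_succ, ih]

theorem filter_zip_map {α : Type} (lines : List α) (p : α → Bool) :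
    ((lines.zip (lines.map p)).filter (fun q => q.2)).map (fun q => q.1) = lines.filter p := by
  induction lines with
  | nil => simp
  | cons a t ih =>
    by_cases h : p a <;> simp [h, ih]

theorem filterContent_eq (content : String) (keywords : List String) :
    filterContent content keywords =
      (let filtered := (PySem.Str.splitlines content).filter
          (fun line => keywords.any (fun kw => PySem.Str.isIn kw (PySem.Str.lower line)))
       if filtered = [] then "No matching lines found." else PySem.Str.join "\n" filtered) := by
  simp only [filterContent]
  rw [mask_foldl _ _ _ (by simp), zipWith_or_replicate_false _ _ _ (by simp),
    List.map_map, filter_zip_map]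
  simp [Function.comp_def]


-- ===== VERDICT (by name: the statement is the Claim_ definition above) =====
theorem filteredValue_eq_filterContent (keywords : List String) (content : String) :
    filteredValue keywords content = filterContent content keywords := by
  rw [filterContent_eq]; rfl

theorem apply_keyword_filter_spec : Claim_equal_apply_keyword_filter := by
  intro logs_dict ks _ hpre
  unfold Pre_apply_keyword_filter at hpre
  unfold Spec_apply_keyword_filter apply_keyword_filter apply_keyword_filter_alt
  by_cases hk : ks = ""
  · simp [hk]
  · simp only [hk, ite_false]
    rw [PySem.Dict.items_foldl_insert_fresh logs_dict Prod.fst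
      (fun p => filteredValue (((PySem.Str.split? ks ",").getD []).map (fun kw => PySem.Str.lower (PySem.Str.strip kw))) p.2)
      PySem.Dict.empty (fun a _ => PySem.Dict.contains_empty _) hpre]
    simp [filteredValue_eq_filterContent, PySem.Dict.empty]
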